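-- pv_equiv track=rewrite | github.com/yi78/pinogol | pinogol.py | sow
-- ===== SOURCE A (Python) =====
-- def sow(field,seed):
-- 	cx = cy = 0; # Cursor coordinates
-- 	field = field[:]
-- 	for y in seed: # y should be a string like '0010'
-- 		newy = list(field[cy]) # newy stores the row to be updated; splitted so we can modify it directly TODO: Find a way to directly modify the character?
-- 		if (cy > len(seed)-1 or cy > len(field)-1):
--
-- 			break
-- 		for x in y: # x should be either '0' or '1'
-- 			if (cx > len(newy)-1 or cx > len(field[cy])-1):
-- 				break
-- 			newy[cx] = x # x is the same as seed[cy][cx]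
-- 			cx += 1
-- 		field[cy] = ''.join(newy) #NOTE: I suppose newy contents shouldn't need to be converted to string at this point because the seed is already supposed to be a string in first place.
-- 		cx  = 0
-- 		cy += 1
-- 	return field
-- ===== SOURCE B (Python) =====
-- def sow(field, seed):
--     field = field[:]
--     for i, row in enumerate(seed):
--         line = field[i]
--         k = min(len(row), len(line))
--         field[i] = row[:k] + line[k:]
--     return field
-- ===== Notes on version B (the rewrite author's own statement) =====
-- stated objective: simpler
-- what changed: Replaces A's per-character inner loop with its list()/join round-trip and cursor bookkeeping by a single slice concatenation row[:k] + line[k:] per seed row (constant-factor win from C-level slicing).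
import Mathlib
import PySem

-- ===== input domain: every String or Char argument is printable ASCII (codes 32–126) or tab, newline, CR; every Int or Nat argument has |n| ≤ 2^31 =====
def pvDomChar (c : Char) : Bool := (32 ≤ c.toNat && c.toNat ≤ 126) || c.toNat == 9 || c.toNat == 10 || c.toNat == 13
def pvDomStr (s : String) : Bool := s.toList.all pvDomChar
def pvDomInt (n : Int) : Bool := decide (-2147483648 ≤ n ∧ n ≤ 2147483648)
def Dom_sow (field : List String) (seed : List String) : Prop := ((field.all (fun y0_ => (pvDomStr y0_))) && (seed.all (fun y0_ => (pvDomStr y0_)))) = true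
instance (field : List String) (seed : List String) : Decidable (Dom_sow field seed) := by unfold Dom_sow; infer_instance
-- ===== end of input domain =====

-- B overlays each seed row by one slice concatenation instead of A's per-character
-- list mutation with cursor bookkeeping (objective: simpler). Python A mutates only
-- its local copy of `field`, so there is no observable side effect to match.

-- ===== PORT A =====
-- inner loop: 'for x in y: if cx > len(newy)-1 or cx > len(field[cy])-1: break; newy[cx] = x; cx += 1'
-- (origLen is len(field[cy]) at loop entry, which A re-reads each iteration; it never changes during the inner loop)
def sowInnerA : List Char → List Char → Nat → Nat → List Char
  | [], newy, _, _ => newy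
  | x :: rest, newy, origLen, cx =>
    if (cx : Int) > (newy.length : Int) - 1 ∨ (cx : Int) > (origLen : Int) - 1 then newy
    else sowInnerA rest (newy.set cx x) origLen (cx + 1)

-- outer loop over seed rows with cursor cy; 'field[cy]' read before the break test,
-- so when cy ≥ len(field) Python raises IndexError (pyGet? = none; outside Pre_, junk value)
def sowOuterA (seedLen : Nat) : List String → List String → Nat → List String
  | field, [], _ => field
  | field, y :: rest, cy =>
    match PySem.List.pyGet? field (cy : Int) with
    | none => field  -- Python raises IndexError here (excluded by Pre_sow)
    | some line =>
      let newy := line.toList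
      if (cy : Int) > (seedLen : Int) - 1 ∨ (cy : Int) > (field.length : Int) - 1 then field
      else
        let newy' := sowInnerA y.toList newy line.toList.length 0
        sowOuterA seedLen (field.set cy (String.ofList newy')) rest (cy + 1)

def sow (field : List String) (seed : List String) : List String :=
  sowOuterA seed.length field seed 0

-- ===== PORT B =====
-- 'for i, row in enumerate(seed): line = field[i]; k = min(len(row), len(line)); field[i] = row[:k] + line[k:]'
def sowAltGo : List String → List String → Nat → List String
  | out, [], _ => out
  | out, row :: rest, i =>
    match PySem.List.pyGet? out (i : Int) with
    | none => out  -- Python raises IndexError here (excluded by Pre_sow)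
    | some line =>
      let k := min row.toList.length line.toList.length
      sowAltGo (out.set i (String.ofList (row.toList.take k ++ line.toList.drop k))) rest (i + 1)

def sow_alt (field : List String) (seed : List String) : List String :=
  sowAltGo field seed 0

-- ===== PRECONDITION & SPEC =====
-- Pre_ excludes exactly the inputs where Python A raises IndexError (field[cy] read
-- with cy = len(field) when the seed has more rows than the field); B raises there too.
def Pre_sow (field : List String) (seed : List String) : Prop := seed.length ≤ field.length
instance (field : List String) (seed : List String) : Decidable (Pre_sow field seed) := by unfold Pre_sow; infer_instance

def pvWitness_sow : List String × List String := (["....", "...."], ["01", "1"])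

def Spec_sow (field : List String) (seed : List String) (out : List String) : Prop := out = sow_alt field seed
instance (field : List String) (seed : List String) (out : List String) : Decidable (Spec_sow field seed out) := by unfold Spec_sow; infer_instance

-- ===== CLAIM (what is proved, stated in full; the proofs are below) =====
def Claim_equal_sow : Prop := ∀ (field : List String) (seed : List String), Dom_sow field seed → Pre_sow field seed → Spec_sow field seed (sow field seed)

-- ===== LEMMAS AND PROOFS =====

-- A's inner character loop equals the slice formula, given origLen = len(newy).
theorem sowInnerA_eq (y : List Char) : ∀ (newy : List Char) (cx : Nat),
    cx ≤ newy.length →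
    sowInnerA y newy newy.length cx =
      newy.take cx ++ y.take (min y.length (newy.length - cx)) ++
        newy.drop (cx + min y.length (newy.length - cx)) := by
  induction y with
  | nil =>
    intro newy cx _
    simp [sowInnerA]
  | cons x rest ih =>
    intro newy cx hcx
    by_cases h : cx < newy.length
    · have hbr : ¬ ((cx : Int) > (newy.length : Int) - 1 ∨ (cx : Int) > (newy.length : Int) - 1) := by
        omega
      rw [sowInnerA, if_neg hbr]
      have hlen : (newy.set cx x).length = newy.length := List.length_set ..
      have hrec := ih (newy.set cx x) (cx + 1) (by rw [hlen]; omega)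
      rw [hlen] at hrec
      rw [hrec]
      have htake : (newy.set cx x).take (cx + 1) = newy.take cx ++ [x] := by
        rw [List.set_eq_take_cons_drop x h, List.take_append]
        simp [Nat.min_eq_left (Nat.le_of_lt h)]
      have hm : min (rest.length + 1) (newy.length - cx)
          = min rest.length (newy.length - (cx + 1)) + 1 := by omega
      simp only [List.length_cons]
      rw [hm, List.take_succ_cons, htake,
        List.drop_set_of_lt (by omega : cx < cx + 1 + min rest.length (newy.length - (cx + 1)))]
      have harith : cx + (min rest.length (newy.length - (cx + 1)) + 1)
          = cx + 1 + min rest.length (newy.length - (cx + 1)) := by omega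
      rw [harith]
      simp
    · have hcxe : cx = newy.length := by omega
      have hbr : ((cx : Int) > (newy.length : Int) - 1 ∨ (cx : Int) > (newy.length : Int) - 1) := by
        omega
      rw [sowInnerA, if_pos hbr]
      simp [hcxe]

-- the two outer loops agree while the cursor stays inside the field
theorem sowOuter_eq (seedLen : Nat) : ∀ (rest : List String) (field : List String) (cy : Nat),
    cy + rest.length ≤ field.length → cy + rest.length ≤ seedLen →
    sowOuterA seedLen field rest cy = sowAltGo field rest cy := by
  intro rest
  induction rest with
  | nil => intro field cy _ _; simp [sowOuterA, sowAltGo]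
  | cons y rest ih =>
    intro field cy hf hs
    have hcy : cy < field.length := by simp at hf; omega
    have hget : PySem.List.pyGet? field (cy : Int) = some field[cy] := by
      rw [PySem.List.pyGet?_natCast]
      exact List.getElem?_eq_getElem hcy
    rw [sowOuterA, sowAltGo, hget]
    dsimp only

    have hbr : ¬ ((cy : Int) > (seedLen : Int) - 1 ∨ (cy : Int) > (field.length : Int) - 1) := by
      simp at hs hf; omega
    rw [if_neg hbr]
    have hinner := sowInnerA_eq y.toList field[cy].toList 0 (Nat.zero_le _)
    simp only [Nat.sub_zero, Nat.zero_add, List.take_zero, List.nil_append] at hinner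
    rw [hinner]
    have hih := ih (field.set cy (String.ofList
        (y.toList.take (min y.toList.length field[cy].toList.length) ++
          field[cy].toList.drop (min y.toList.length field[cy].toList.length)))) (cy + 1)
      (by simp at hf ⊢; omega) (by simp at hs; omega)
    exact hih

-- ===== VERDICT (by name: the statement is the Claim_ definition above) =====
theorem sow_spec : Claim_equal_sow := by
  intro field seed _ hpre
  unfold Spec_sow sow sow_alt
  exact sowOuter_eq seed.length seed field 0 (by simpa using hpre) (by simp)
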